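-- pv_equiv track=rewrite | github.com/szymszok/prg-basics | 04-Functions/7.15.py | door
-- ===== SOURCE A (Python) =====
-- def door(detector):
--     is_in = 0
--     max_in = 0
--     for char in detector:
--         if char == '+':
--             is_in +=1
--         elif char == '-':
--             is_in -= 1
--         if is_in > max_in:
--             max_in = is_in
--     if max_in >= 3:
--         true_false = True
--     else:
--         true_false = False
--     return true_false
-- ===== SOURCE B (Python) =====
-- def door(detector):
--     # Scan backwards, maintaining the maximum occupancy reachable from the
--     # current suffix (a reversed Kadane-style fold with one accumulator).
--     peak = 0
--     for c in reversed(detector):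
--         d = 1 if c == '+' else -1 if c == '-' else 0
--         peak = max(0, d + peak)
--     return peak >= 3
-- ===== Notes on version B (the rewrite author's own statement) =====
-- stated objective: alternative
-- what changed: Replaces the forward loop threading two counters (running occupancy and its max) with a backward fold keeping a single accumulator: the maximum prefix-sum peak of the remaining suffix, max(0, d + peak).
import Mathlib
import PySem

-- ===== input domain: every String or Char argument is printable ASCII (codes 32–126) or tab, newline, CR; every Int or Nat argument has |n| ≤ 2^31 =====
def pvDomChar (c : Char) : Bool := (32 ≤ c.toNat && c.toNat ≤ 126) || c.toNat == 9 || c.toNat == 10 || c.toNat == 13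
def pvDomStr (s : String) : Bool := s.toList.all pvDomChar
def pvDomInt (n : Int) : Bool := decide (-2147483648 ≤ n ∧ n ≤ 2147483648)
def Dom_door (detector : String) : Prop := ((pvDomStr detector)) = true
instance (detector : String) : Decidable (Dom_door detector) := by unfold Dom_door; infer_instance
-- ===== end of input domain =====

-- B scans backwards with a single accumulator (max peak of the suffix) instead of
-- A's forward loop threading the running occupancy and its maximum; alternative, same cost.

-- ===== PORT A =====
def door (detector : String) : Bool :=
  let st := detector.toList.foldl (fun (st : Int × Int) char =>
    let is_in := if char = '+' then st.1 + 1 else if char = '-' then st.1 - 1 else st.1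
    let max_in := if st.2 < is_in then is_in else st.2
    (is_in, max_in)) (0, 0)
  if 3 ≤ st.2 then true else false

-- ===== PORT B =====
def door_alt (detector : String) : Bool :=
  let peak := detector.toList.reverse.foldl (fun peak c =>
    let d : Int := if c = '+' then 1 else if c = '-' then -1 else 0
    max 0 (d + peak)) 0
  decide (3 ≤ peak)

-- ===== PRECONDITION & SPEC =====
def Spec_door (detector : String) (out : Bool) : Prop := out = door_alt detector
instance (detector : String) (out : Bool) : Decidable (Spec_door detector out) := by unfold Spec_door; infer_instance

-- ===== CLAIM (what is proved, stated in full; the proofs are below) =====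
def Claim_equal_door : Prop := ∀ (detector : String), Dom_door detector → Spec_door detector (door detector)

-- ===== LEMMAS AND PROOFS =====

-- B's backward fold, written as a foldr (foldl over the reversed list).
theorem peak_nonneg (l : List Char) :
    0 ≤ l.foldr (fun c p => max 0 ((if c = '+' then (1:Int) else if c = '-' then -1 else 0) + p)) 0 := by
  induction l with
  | nil => simp
  | cons c t ih => exact le_max_left _ _

-- Loop invariant: A's running max equals max of the carried max and s plus B's suffix peak,
-- provided the running occupancy s never exceeds the carried max m.
theorem fold_eq (l : List Char) : ∀ (s m : Int), s ≤ m →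
    (l.foldl (fun (st : Int × Int) char =>
      let is_in := if char = '+' then st.1 + 1 else if char = '-' then st.1 - 1 else st.1
      let max_in := if st.2 < is_in then is_in else st.2
      (is_in, max_in)) (s, m)).2
    = max m (s + l.foldr (fun c p => max 0 ((if c = '+' then (1:Int) else if c = '-' then -1 else 0) + p)) 0) := by
  induction l with
  | nil => intro s m h; simp; omega
  | cons c t ih =>
    intro s m h
    have hP := peak_nonneg t
    simp only [List.foldl_cons, List.foldr_cons]
    by_cases h1 : c = '+' <;> by_cases h2 : c = '-' <;>
      simp only [h1, h2, if_true, if_false] <;>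
      · rw [ih _ _ (by split_ifs <;> omega)]
        split_ifs <;> omega

theorem door_eq (detector : String) : door detector = door_alt detector := by
  simp only [door, door_alt, List.foldl_reverse]
  rw [fold_eq detector.toList 0 0 le_rfl]
  have hP := peak_nonneg detector.toList
  split_ifs with hc <;> simp <;> omega

-- ===== VERDICT (by name: the statement is the Claim_ definition above) =====
theorem door_spec : Claim_equal_door := by
  intro detector _
  exact door_eq detector
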